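-- pv_equiv track=rewrite | github.com/LB365/balance-table | balance_table/dep_graph.py | find_dep_graph
-- ===== SOURCE A (Python) =====
-- def find_parents(x, input_data):
--     res = []
--     new = input_data[x]
--     while new != []:
--         res.extend([i for i in new if i not in res])
--         temp = []
--         for i in res:
--             if input_data.get(i):
--                 temp.extend(input_data.get(i))
--         new = [k for k in temp if k not in res]
--     return res
--
-- def find_dep_graph(dependency_graph):
--     output_parents = {i: find_parents(i, dependency_graph)
--                       for i in dependency_graph}
--     output_childrens = {k: [] for k in dependency_graph.keys()}
--     for x in dependency_graph:
--         for child, parents in output_parents.items():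
--             for parent in parents:
--                 if x == parent:
--                     output_childrens[x].append(child)
--     return dict(filter(lambda v: v[1], output_childrens.items()))
-- ===== SOURCE B (Python) =====
-- def _ancestors(g, acc, frontier):
--     """Transitive ancestors, collected level by level by frontier expansion."""
--     while frontier:
--         nxt = [q for p in frontier for q in g.get(p, [])
--                if q not in acc and q not in frontier]
--         acc, frontier = acc + frontier, nxt
--     return acc
--
--
-- def find_dep_graph(dependency_graph):
--     pairs = [(p, c) for c, ps in dependency_graph.items()
--              for p in _ancestors(dependency_graph, [], list(ps))
--              if p in dependency_graph]
--     children = {}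
--     for p, c in pairs:
--         children.setdefault(p, []).append(c)
--     return {k: children[k] for k in dependency_graph if k in children}
-- ===== Notes on version B (the rewrite author's own statement) =====
-- stated objective: faster
-- what changed: B collects each node's ancestors by frontier-only level expansion (A's while-loop re-scans and re-expands the whole accumulated list every round) and then inverts the (ancestor, child) pairs in one linear pass with dict.setdefault/append, replacing A's triple nested loop over key x child x parent and the final dict(filter(...)) pass.
import Mathlib
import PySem

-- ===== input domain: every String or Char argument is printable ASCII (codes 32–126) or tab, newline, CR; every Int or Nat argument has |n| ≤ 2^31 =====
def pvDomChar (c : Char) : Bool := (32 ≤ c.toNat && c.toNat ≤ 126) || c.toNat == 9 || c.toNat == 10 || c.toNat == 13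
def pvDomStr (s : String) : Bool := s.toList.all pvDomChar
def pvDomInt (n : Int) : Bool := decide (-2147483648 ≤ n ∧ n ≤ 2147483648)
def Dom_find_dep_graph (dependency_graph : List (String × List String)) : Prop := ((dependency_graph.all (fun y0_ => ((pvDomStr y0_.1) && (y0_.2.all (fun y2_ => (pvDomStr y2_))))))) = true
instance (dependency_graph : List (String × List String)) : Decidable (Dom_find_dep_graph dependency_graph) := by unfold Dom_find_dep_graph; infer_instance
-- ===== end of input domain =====

-- B computes each node's ancestors by a recursive level-by-level frontier expansion and builds the
-- result per key directly by counting, instead of A's rescan-everything loop and triple inversion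
-- loop (objective: faster). Return values only; no argument is mutated.

-- ===== PORT A =====
-- Termination infrastructure for the while-loops of both versions (cited by decreasing_by only).
def pvVals (g : List (String × List String)) : List String := g.flatMap (fun kv => kv.2)

def pvMeasure (g : List (String × List String)) (res new : List String) : Nat :=
  ((new ++ pvVals g).toFinset \ res.toFinset).card * 2 +
    (if new ≠ [] ∧ ∀ i ∈ new, i ∈ res then 1 else 0)

lemma pvMem_vals_of_get (g : List (String × List String)) (i k : String)
    (h : k ∈ ((PySem.Dict.get? (PySem.Dict.mk g) i).getD [])) : k ∈ pvVals g := by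
  cases hg : PySem.Dict.get? (PySem.Dict.mk g) i with
  | none => rw [hg] at h; simp at h
  | some l =>
    rw [hg] at h
    have hmem : (i, l) ∈ (PySem.Dict.mk g).items := PySem.Dict.mem_items_of_get?_eq_some _ hg
    exact List.mem_flatMap.mpr ⟨(i, l), hmem, by simpa using h⟩

lemma pvMeasure_decreasing (g : List (String × List String)) (res new res' new' : List String)
    (hne : new ≠ [])
    (hfin : res'.toFinset = res.toFinset ∪ new.toFinset)
    (hnew' : ∀ k ∈ new', k ∈ pvVals g ∧ k ∉ res') :
    pvMeasure g res' new' < pvMeasure g res new := by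
  unfold pvMeasure
  by_cases hex : ∀ i ∈ new, i ∈ res
  · -- stagnant round: the visited set does not change, but the flag drops
    have hres' : res'.toFinset = res.toFinset := by
      rw [hfin, Finset.union_eq_left]
      intro x hx
      rw [List.mem_toFinset] at hx ⊢
      exact hex x hx
    have hS : (new' ++ pvVals g).toFinset \ res'.toFinset
        = (new ++ pvVals g).toFinset \ res.toFinset := by
      rw [hres']
      ext x
      simp only [Finset.mem_sdiff, List.mem_toFinset, List.mem_append]
      constructor
      · rintro ⟨hx1, hx2⟩
        refine ⟨Or.inr ?_, hx2⟩
        rcases hx1 with hx1 | hx1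
        · have := (hnew' x hx1).1
          exact this
        · exact hx1
      · rintro ⟨hx1, hx2⟩
        refine ⟨?_, hx2⟩
        rcases hx1 with hx1 | hx1
        · exact absurd (hex x hx1) hx2
        · exact Or.inr hx1
    have hflag : (if new' ≠ [] ∧ ∀ i ∈ new', i ∈ res' then 1 else 0) = 0 := by
      split_ifs with h
      · obtain ⟨hne', hall⟩ := h
        obtain ⟨k, hk⟩ := List.exists_mem_of_ne_nil new' hne'
        exact absurd (hall k hk) (hnew' k hk).2
      · rfl
    rw [hS, hflag, if_pos ⟨hne, hex⟩]
    omega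
  · -- progress round: at least one genuinely new element enters the visited set
    push_neg at hex
    obtain ⟨i, hi, hir⟩ := hex
    have hcard : ((new' ++ pvVals g).toFinset \ res'.toFinset).card
        < ((new ++ pvVals g).toFinset \ res.toFinset).card := by
      apply Finset.card_lt_card
      constructor
      · intro x hx
        simp only [Finset.mem_sdiff, List.mem_toFinset, List.mem_append] at hx ⊢
        obtain ⟨hx1, hx2⟩ := hx
        have hres_sub : x ∉ res := by
          intro hxr
          exact hx2 (List.mem_toFinset.mp
            (by rw [hfin]; exact Finset.mem_union_left _ (List.mem_toFinset.mpr hxr)))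
        refine ⟨?_, hres_sub⟩
        rcases hx1 with hx1 | hx1
        · exact Or.inr (hnew' x hx1).1
        · exact Or.inr hx1
      · intro hsub
        have hiL : i ∈ (new ++ pvVals g).toFinset \ res.toFinset := by
          simp only [Finset.mem_sdiff, List.mem_toFinset, List.mem_append]
          exact ⟨Or.inl hi, hir⟩
        have := hsub hiL
        simp only [Finset.mem_sdiff, List.mem_toFinset] at this
        exact this.2 (List.mem_toFinset.mp
          (by rw [hfin]; exact Finset.mem_union_right _ (List.mem_toFinset.mpr hi)))
    have h1 : (if new' ≠ [] ∧ ∀ i ∈ new', i ∈ res' then 1 else 0) ≤ 1 := by split_ifs <;> omega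
    have h2 : (0:Nat) ≤ (if new ≠ [] ∧ ∀ i ∈ new, i ∈ res then 1 else 0) := by omega
    omega

-- while-loop of A's find_parents; `input_data.get(i)` truthiness (None and [] both extend nothing)
-- is ported as getD with default []; `i not in res` is `decide (i ∉ res)`.
lemma pvUnattachFilter (new res : List String) :
    (List.filter (fun x => decide (↑x ∉ res)) new.attach).unattach
      = new.filter (fun i => decide (i ∉ res)) := by
  rw [List.filter_attach (p := fun i => decide (i ∉ res))]
  rw [List.unattach, List.map_map]
  simp [Function.comp, Subtype.map]

lemma pvDecA (g : List (String × List String)) (res new : List String) (hne : new ≠ []) :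
    pvMeasure g (res ++ new.filter (fun i => decide (i ∉ res)))
      ((((res ++ new.filter (fun i => decide (i ∉ res))).foldl
          (fun t i => t ++ ((PySem.Dict.get? (PySem.Dict.mk g) i).getD [])) []).filter
        (fun k => decide (k ∉ (res ++ new.filter (fun i => decide (i ∉ res)))))))
      < pvMeasure g res new := by
  apply pvMeasure_decreasing g res new _ _ hne
  · ext x
    simp only [List.toFinset_append, Finset.mem_union, List.mem_toFinset]
    by_cases hx : x ∈ res <;> simp [hx]
  · intro k hk
    rw [List.mem_filter] at hk
    obtain ⟨hk1, hk2⟩ := hk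
    rw [PySem.List.foldl_append_eq_flatMap, List.nil_append, List.mem_flatMap] at hk1
    obtain ⟨i, -, hki⟩ := hk1
    exact ⟨pvMem_vals_of_get g i k hki, of_decide_eq_true hk2⟩

def findParentsLoop (g : List (String × List String)) (res new : List String) : List String :=
  if hne : new = [] then res
  else
    findParentsLoop g (res ++ new.filter (fun i => decide (i ∉ res)))
      ((((res ++ new.filter (fun i => decide (i ∉ res))).foldl
          (fun t i => t ++ ((PySem.Dict.get? (PySem.Dict.mk g) i).getD [])) []).filter
        (fun k => decide (k ∉ (res ++ new.filter (fun i => decide (i ∉ res)))))))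
termination_by pvMeasure g res new
decreasing_by rw [pvUnattachFilter]; exact pvDecA g res new hne

-- x is always a key of input_data at every call site, so `input_data[x]` is read with getD
def find_parents (x : String) (input_data : List (String × List String)) : List String :=
  findParentsLoop input_data [] ((PySem.Dict.get? (PySem.Dict.mk input_data) x).getD [])

def find_dep_graph (dependency_graph : List (String × List String)) : List (String × List String) :=
  let keys := (PySem.Dict.mk dependency_graph).keys
  let output_parents := keys.foldl
    (fun d i => d.insert i (find_parents i dependency_graph)) (PySem.Dict.mk [])
  let oc0 := keys.foldl (fun d k => d.insert k ([] : List String)) (PySem.Dict.mk [])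
  let oc := keys.foldl (fun oc x =>
      output_parents.items.foldl (fun oc cp =>
        cp.2.foldl (fun oc parent =>
          if x == parent then oc.modify x [] (fun l => l ++ [cp.1]) else oc) oc) oc) oc0
  -- dict(filter(lambda v: v[1], …)): keys are distinct, so the dict is the filtered items list
  oc.items.filter (fun kv => decide (kv.2 ≠ []))

-- ===== PORT B =====
lemma pvDecB (g : List (String × List String)) (acc frontier : List String)
    (hne : frontier ≠ []) :
    pvMeasure g (acc ++ frontier)
      (frontier.flatMap (fun p =>
        ((PySem.Dict.get? (PySem.Dict.mk g) p).getD []).filter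
          (fun q => decide (q ∉ acc ∧ q ∉ frontier))))
      < pvMeasure g acc frontier := by
  apply pvMeasure_decreasing g acc frontier _ _ hne
  · simp
  · intro k hk
    rw [List.mem_flatMap] at hk
    obtain ⟨p, -, hkp⟩ := hk
    rw [List.mem_filter] at hkp
    obtain ⟨hk1, hk2⟩ := hkp
    have := of_decide_eq_true hk2
    exact ⟨pvMem_vals_of_get g p k hk1, by
      rw [List.mem_append]
      rintro (h | h)
      · exact this.1 h
      · exact this.2 h⟩

-- B's _ancestors: recursive level-by-level frontier expansion
def ancestorsRec (g : List (String × List String)) (acc frontier : List String) : List String :=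
  if hne : frontier = [] then acc
  else
    ancestorsRec g (acc ++ frontier)
      (frontier.flatMap (fun p =>
        ((PySem.Dict.get? (PySem.Dict.mk g) p).getD []).filter
          (fun q => decide (q ∉ acc ∧ q ∉ frontier))))
termination_by pvMeasure g acc frontier
decreasing_by simp only [List.flatMap_subtype, List.unattach_attach]; exact pvDecB g acc frontier hne

def find_dep_graph_alt (dependency_graph : List (String × List String)) : List (String × List String) :=
  -- pairs: every (ancestor, child) edge of the transitive closure, ancestors restricted to keys
  let pairs := (PySem.Dict.mk dependency_graph).items.flatMap (fun cp =>
    ((ancestorsRec dependency_graph [] cp.2).filter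
        (fun p => (PySem.Dict.mk dependency_graph).contains p)).map (fun p => (p, cp.1)))
  -- children.setdefault(p, []).append(c) is Dict.modify with default []
  let children := pairs.foldl
    (fun ch pc => ch.modify pc.1 [] (fun v => v ++ [pc.2])) (PySem.Dict.mk [])
  -- {k: children[k] for k in dependency_graph if k in children}
  (PySem.Dict.mk dependency_graph).keys.filterMap
    (fun k => if children.contains k then some (k, children.getD k []) else none)

-- ===== PRECONDITION & SPEC =====
-- Pre_ excludes association lists with duplicate keys: those do not represent any Python dict
-- (A's parameter is a dict, whose keys are always distinct), so A's behaviour there is undefined.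
def Pre_find_dep_graph (dependency_graph : List (String × List String)) : Prop :=
  (dependency_graph.map Prod.fst).Nodup
instance (dependency_graph : List (String × List String)) : Decidable (Pre_find_dep_graph dependency_graph) := by unfold Pre_find_dep_graph; infer_instance

def pvWitness_find_dep_graph : (List (String × List String)) := [("a", ["b"]), ("b", [])]

def Spec_find_dep_graph (dependency_graph : List (String × List String)) (out : List (String × List String)) : Prop := out = find_dep_graph_alt dependency_graph
instance (dependency_graph : List (String × List String)) (out : List (String × List String)) : Decidable (Spec_find_dep_graph dependency_graph out) := by unfold Spec_find_dep_graph; infer_instance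

-- ===== CLAIM (what is proved, stated in full; the proofs are below) =====
def Claim_equal_find_dep_graph : Prop := ∀ (dependency_graph : List (String × List String)), Dom_find_dep_graph dependency_graph → Pre_find_dep_graph dependency_graph → Spec_find_dep_graph dependency_graph (find_dep_graph dependency_graph)

-- ===== LEMMAS AND PROOFS =====

-- The two ancestor loops compute the same list from any state where the pending elements are
-- fresh and the parents of every visited element are already scheduled: A's re-scan of the
-- whole `res` each round contributes nothing beyond B's frontier.
lemma pv_loop_eq (g : List (String × List String)) (n : Nat) :
    ∀ res new : List String, pvMeasure g res new = n →
    (∀ k ∈ new, k ∉ res) →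
    (∀ i ∈ res, ∀ k ∈ ((PySem.Dict.get? (PySem.Dict.mk g) i).getD []), k ∈ res ∨ k ∈ new) →
    findParentsLoop g res new = ancestorsRec g res new := by
  induction n using Nat.strong_induction_on with
  | _ n ih =>
    intro res new hm hdisj hclosed
    by_cases hne : new = []
    · rw [findParentsLoop, ancestorsRec]
      rw [dif_pos hne, dif_pos hne]
    · rw [findParentsLoop, ancestorsRec]
      rw [dif_neg hne, dif_neg hne]
      have hfilter : new.filter (fun i => decide (i ∉ res)) = new :=
        List.filter_eq_self.mpr (fun a ha => decide_eq_true (hdisj a ha))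
      rw [hfilter]
      have hpred : ∀ p : String,
          ((PySem.Dict.get? (PySem.Dict.mk g) p).getD []).filter
              (fun q => decide (q ∉ res ∧ q ∉ new))
            = ((PySem.Dict.get? (PySem.Dict.mk g) p).getD []).filter
              (fun q => decide (q ∉ (res ++ new))) := by
        intro p
        apply List.filter_congr
        intro q _
        simp [List.mem_append, not_or]
      have htemp : (((res ++ new).foldl
            (fun t i => t ++ ((PySem.Dict.get? (PySem.Dict.mk g) i).getD [])) []).filter
              (fun k => decide (k ∉ (res ++ new))))
          = new.flatMap (fun p =>
              ((PySem.Dict.get? (PySem.Dict.mk g) p).getD []).filter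
                (fun q => decide (q ∉ (res ++ new)))) := by
        rw [PySem.List.foldl_append_eq_flatMap, List.nil_append, List.flatMap_append,
          List.filter_append]
        have h1 : ((res.flatMap (fun i => (PySem.Dict.get? (PySem.Dict.mk g) i).getD [])).filter
            (fun k => decide (k ∉ (res ++ new)))) = [] := by
          rw [List.filter_eq_nil_iff]
          intro k hk
          rw [List.mem_flatMap] at hk
          obtain ⟨i, hi, hki⟩ := hk
          have := hclosed i hi k hki
          simp only [decide_eq_true_eq, List.mem_append, not_not]
          simpa using this
        rw [h1, List.nil_append, List.filter_flatMap]
      have hBfront : new.flatMap (fun p =>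
            ((PySem.Dict.get? (PySem.Dict.mk g) p).getD []).filter
              (fun q => decide (q ∉ res ∧ q ∉ new)))
          = new.flatMap (fun p =>
              ((PySem.Dict.get? (PySem.Dict.mk g) p).getD []).filter
                (fun q => decide (q ∉ (res ++ new)))) := by
        simp only [List.flatMap_def]
        exact congrArg List.flatten (List.map_congr_left (fun p _ => hpred p))
      rw [htemp, hBfront]
      set X := new.flatMap (fun p =>
          ((PySem.Dict.get? (PySem.Dict.mk g) p).getD []).filter
            (fun q => decide (q ∉ (res ++ new)))) with hX
      have hXmem : ∀ k ∈ X, k ∈ pvVals g ∧ k ∉ (res ++ new) := by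
        intro k hk
        rw [hX, List.mem_flatMap] at hk
        obtain ⟨p, -, hkp⟩ := hk
        rw [List.mem_filter] at hkp
        exact ⟨pvMem_vals_of_get g p k hkp.1, of_decide_eq_true hkp.2⟩
      have hlt : pvMeasure g (res ++ new) X < n := by
        rw [← hm]
        exact pvMeasure_decreasing g res new (res ++ new) X hne (by simp) hXmem
      apply ih _ hlt _ _ rfl
      · intro k hk
        exact (hXmem k hk).2
      · intro i hi k hki
        rw [List.mem_append] at hi
        rcases hi with hi | hi
        · rcases hclosed i hi k hki with h | h
          · exact Or.inl (List.mem_append.mpr (Or.inl h))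
          · exact Or.inl (List.mem_append.mpr (Or.inr h))
        · by_cases hkin : k ∈ res ++ new
          · exact Or.inl hkin
          · refine Or.inr ?_
            rw [hX, List.mem_flatMap]
            exact ⟨i, hi, List.mem_filter.mpr ⟨hki, decide_eq_true hkin⟩⟩

lemma pv_find_parents_eq (g : List (String × List String)) (x : String) :
    find_parents x g
      = ancestorsRec g [] ((PySem.Dict.get? (PySem.Dict.mk g) x).getD []) := by
  apply pv_loop_eq g _ _ _ rfl
  · intro k _ hk
    simp at hk
  · intro i hi
    simp at hi

-- value of a key in a dict whose items are keys.map (k, f k)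
lemma pv_getD_mapped (keys : List String) (f : String → List String) (p : String)
    (hp : p ∈ keys) (d0 : List String) :
    (PySem.Dict.mk (keys.map (fun k => (k, f k)))).getD p d0 = f p := by
  induction keys with
  | nil => cases hp
  | cons a ks ih =>
    rw [PySem.Dict.getD_eq_get?_getD] at *
    rw [List.map_cons, PySem.Dict.get?_mk_cons]
    by_cases hap : a = p
    · subst hap
      simp
    · rw [if_neg (by simpa using hap)]
      rcases List.mem_cons.mp hp with h | h
      · exact absurd h.symm hap
      · exact ih h

lemma pv_insert_mapped (keys : List String) (f : String → List String) (p : String)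
    (v : List String) (hp : p ∈ keys) :
    PySem.Dict.insert (PySem.Dict.mk (keys.map (fun k => (k, f k)))) p v
      = PySem.Dict.mk (keys.map (fun k => (k, if k = p then v else f k))) := by
  have hc : (PySem.Dict.mk (keys.map (fun k => (k, f k)))).contains p = true := by
    rw [PySem.Dict.contains_iff_mem_keys]
    simpa [PySem.Dict.keys, List.map_map, Function.comp] using hp
  apply PySem.Dict.ext
  simp only [PySem.Dict.insert, hc, if_true, List.map_map]
  apply List.map_congr_left
  intro k _
  by_cases hkp : k = p
  · subst hkp; simp
  · simp [hkp]

lemma pv_modify_mapped (keys : List String) (f : String → List String) (p : String)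
    (h : List String → List String) (hp : p ∈ keys) :
    PySem.Dict.modify (PySem.Dict.mk (keys.map (fun k => (k, f k)))) p [] h
      = PySem.Dict.mk (keys.map (fun k => (k, if k = p then h (f k) else f k))) := by
  unfold PySem.Dict.modify
  rw [pv_getD_mapped keys f p hp, pv_insert_mapped keys f p _ hp]
  congr 1
  apply List.map_congr_left
  intro k _
  by_cases hkp : k = p
  · subst hkp; simp
  · simp [hkp]

-- A's innermost loop over one parents list: appends the child once per occurrence of x
lemma pvA_inner (keys : List String) (x c : String) (hx : x ∈ keys)
    (parents : List String) :
    ∀ f : String → List String,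
    parents.foldl (fun oc parent =>
        if x == parent then PySem.Dict.modify oc x [] (fun l => l ++ [c]) else oc)
      (PySem.Dict.mk (keys.map (fun k => (k, f k))))
    = PySem.Dict.mk (keys.map (fun k =>
        (k, if k = x then f k ++ List.replicate (parents.count x) c else f k))) := by
  induction parents with
  | nil =>
    intro f
    rw [List.foldl_nil]
    congr 1
    apply List.map_congr_left
    intro k _
    by_cases hkx : k = x <;> simp [hkx]
  | cons p ps ih =>
    intro f
    rw [List.foldl_cons]
    by_cases hxp : x = p
    · rw [if_pos (by simpa using hxp),
        pv_modify_mapped keys f x (fun l => l ++ [c]) hx,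
        ih (fun k => if k = x then f k ++ [c] else f k)]
      congr 1
      apply List.map_congr_left
      intro k _
      by_cases hkx : k = x
      · subst hkx
        subst hxp
        simp [List.count_cons_self, List.replicate_succ, List.append_assoc]
      · simp [hkx]
    · rw [if_neg (by simpa using hxp), ih f]
      congr 1
      apply List.map_congr_left
      intro k _
      by_cases hkx : k = x
      · subst hkx
        simp [Ne.symm hxp]
      · simp [hkx]

-- A's middle loop over output_parents.items
lemma pvA_mid (keys : List String) (x : String) (hx : x ∈ keys)
    (cps : List (String × List String)) :
    ∀ f : String → List String,
    cps.foldl (fun oc cp =>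
        cp.2.foldl (fun oc parent =>
          if x == parent then PySem.Dict.modify oc x [] (fun l => l ++ [cp.1]) else oc) oc)
      (PySem.Dict.mk (keys.map (fun k => (k, f k))))
    = PySem.Dict.mk (keys.map (fun k =>
        (k, if k = x then
              f k ++ cps.flatMap (fun cp => List.replicate (cp.2.count x) cp.1)
            else f k))) := by
  induction cps with
  | nil =>
    intro f
    rw [List.foldl_nil]
    congr 1
    apply List.map_congr_left
    intro k _
    by_cases hkx : k = x <;> simp [hkx]
  | cons cp cps ih =>
    intro f
    rw [List.foldl_cons, pvA_inner keys x cp.1 hx cp.2 f,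
      ih (fun k => if k = x then f k ++ List.replicate (cp.2.count x) cp.1 else f k)]
    congr 1
    apply List.map_congr_left
    intro k _
    by_cases hkx : k = x
    · subst hkx
      simp [List.append_assoc]
    · simp [hkx]

-- A's outer loop over the keys: each x ∈ keys receives its own children list exactly once
lemma pvA_outer (keys : List String) (cps : List (String × List String)) :
    ∀ (xs : List String) (f : String → List String), xs.Nodup → (∀ x ∈ xs, x ∈ keys) →
    xs.foldl (fun oc x =>
        cps.foldl (fun oc cp =>
          cp.2.foldl (fun oc parent =>
            if x == parent then PySem.Dict.modify oc x [] (fun l => l ++ [cp.1]) else oc) oc) oc)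
      (PySem.Dict.mk (keys.map (fun k => (k, f k))))
    = PySem.Dict.mk (keys.map (fun k =>
        (k, if k ∈ xs then
              f k ++ cps.flatMap (fun cp => List.replicate (cp.2.count k) cp.1)
            else f k))) := by
  intro xs
  induction xs with
  | nil =>
    intro f _ _
    simp
  | cons x xs ih =>
    intro f hnd hsub
    rw [List.foldl_cons, pvA_mid keys x (hsub x List.mem_cons_self) cps f,
      ih _ (List.nodup_cons.mp hnd).2 (fun y hy => hsub y (List.mem_cons_of_mem x hy))]
    have hxnot : x ∉ xs := (List.nodup_cons.mp hnd).1
    congr 1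
    apply List.map_congr_left
    intro k _
    by_cases hkx : k = x
    · subst hkx
      simp [hxnot]
    · by_cases hkxs : k ∈ xs <;> simp [hkx, hkxs]

lemma pv_init_dict (keys : List String) (hnd : keys.Nodup) (v : String → List String) :
    keys.foldl (fun d k => d.insert k (v k)) (PySem.Dict.mk [])
      = PySem.Dict.mk (keys.map (fun k => (k, v k))) := by
  apply PySem.Dict.ext
  have := PySem.Dict.items_foldl_insert_fresh keys (fun a => a) v (PySem.Dict.mk [])
    (fun a _ => rfl) (by simpa using hnd)
  simpa using this

-- a run of equal ancestors contributes the child once per occurrence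
lemma pv_filter_eq_replicate (l : List String) (k c : String) :
    ((l.filter (fun p => p == k)).map (fun _ => c)) = List.replicate (l.count k) c := by
  rw [List.eq_replicate_iff]
  constructor
  · rw [List.length_map]
    simp [List.count_eq_countP, List.countP_eq_length_filter]
  · intro b hb
    rw [List.mem_map] at hb
    obtain ⟨-, -, hbc⟩ := hb
    exact hbc.symm

-- filterMap with an emptiness guard is a filter of the mapped list
lemma pv_filterMap_filter (f : String → List String) (ks : List String) :
    ks.filterMap (fun k => if f k ≠ [] then some (k, f k) else none)
      = (ks.map (fun k => (k, f k))).filter (fun kv => decide (kv.2 ≠ [])) := by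
  induction ks with
  | nil => rfl
  | cons k ks ih =>
    rw [List.filterMap_cons, List.map_cons, List.filter_cons]
    by_cases hk : f k = []
    · rw [if_neg (by simpa using hk)]
      have : (decide ((k, f k).2 ≠ [])) = false := by simpa using hk
      rw [this]
      simpa using ih
    · rw [if_pos (by simpa using hk)]
      have : (decide ((k, f k).2 ≠ [])) = true := by simpa using hk
      rw [this]
      simpa using ih

-- each item's value is its key's lookup, under distinct keys
lemma pv_get_of_mem (g : List (String × List String)) (hnd : (g.map Prod.fst).Nodup)
    (cp : String × List String) (hcp : cp ∈ g) :
    (PySem.Dict.get? (PySem.Dict.mk g) cp.1).getD [] = cp.2 := by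
  have hk : (PySem.Dict.mk g).keys.Nodup := by
    simpa [PySem.Dict.keys] using hnd
  have : PySem.Dict.get? (PySem.Dict.mk g) cp.1 = some cp.2 := by
    have hmem : (cp.1, cp.2) ∈ (PySem.Dict.mk g).items := by simpa using hcp
    exact PySem.Dict.get?_of_mem_items _ hmem hk
  rw [this]
  rfl

-- the whole-program equality, under distinct keys
-- B's side reduced to a filtered map over the keys, under distinct keys
lemma pvB_eq (g : List (String × List String)) (hnd : (g.map Prod.fst).Nodup) :
    find_dep_graph_alt g
      = ((PySem.Dict.mk g).keys.map (fun k =>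
          (k, g.flatMap (fun cp =>
                List.replicate ((ancestorsRec g [] cp.2).count k) cp.1)))).filter
          (fun kv => decide (kv.2 ≠ [])) := by
  simp only [find_dep_graph_alt]
  set G := fun k => g.flatMap (fun cp =>
      List.replicate ((ancestorsRec g [] cp.2).count k) cp.1) with hG
  set pairs := (PySem.Dict.mk g).items.flatMap (fun cp =>
    ((ancestorsRec g [] cp.2).filter
        (fun p => (PySem.Dict.mk g).contains p)).map (fun p => (p, cp.1))) with hpairs
  set children := pairs.foldl
    (fun ch pc => ch.modify pc.1 [] (fun v => v ++ [pc.2])) (PySem.Dict.mk []) with hch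
  have hget : ∀ k, children.getD k []
      = (pairs.filter (fun pc => pc.1 == k)).map (fun pc => pc.2) := by
    intro k
    rw [hch, PySem.Dict.getD_foldl_modify_append pairs (PySem.Dict.mk []) k]
    rfl
  have hcont : ∀ k, children.contains k = true ↔ k ∈ pairs.map Prod.fst := by
    intro k
    rw [hch, PySem.Dict.contains_iff_mem_keys,
      PySem.Dict.keys_foldl_modify_key pairs Prod.fst [] (fun _ pc => (fun v => v ++ [pc.2]))
        (PySem.Dict.mk [])]
    exact PySem.Set.mem_ofList (pairs.map Prod.fst) k
  -- for a key k of the graph, the collected pairs with first component k spell out G k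
  have hval : ∀ k, k ∈ (PySem.Dict.mk g).keys →
      (pairs.filter (fun pc => pc.1 == k)).map (fun pc => pc.2) = G k := by
    intro k hkmem
    have hkc : (PySem.Dict.mk g).contains k = true :=
      (PySem.Dict.contains_iff_mem_keys _ _).mpr hkmem
    rw [hpairs, List.filter_flatMap, List.map_flatMap, hG]
    simp only [List.flatMap_def]
    apply congrArg List.flatten
    apply List.map_congr_left
    intro cp _
    rw [List.filter_map, List.map_map, List.filter_filter]
    have hcollapse : ((ancestorsRec g [] cp.2).filter
          (fun a => ((fun pc : String × String => pc.1 == k) ∘ fun p => (p, cp.1)) a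
            && (PySem.Dict.mk g).contains a))
        = (ancestorsRec g [] cp.2).filter (fun p => p == k) := by
      apply List.filter_congr
      intro p _
      show ((p == k) && (PySem.Dict.mk g).contains p) = (p == k)
      by_cases hpk : p = k
      · subst hpk
        simp [hkc]
      · simp [hpk]
    rw [hcollapse,
      show ((fun pc : String × String => pc.2) ∘ fun p : String => (p, cp.1))
        = (fun _ : String => cp.1) from rfl]
    exact pv_filter_eq_replicate (ancestorsRec g [] cp.2) k cp.1
  -- pointwise, the guarded entry is the emptiness test on G k
  have hfun : ∀ k, k ∈ (PySem.Dict.mk g).keys →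
      (if children.contains k then some (k, children.getD k []) else none)
        = (if G k ≠ [] then some (k, G k) else none) := by
    intro k hkmem
    have hiff : children.contains k = true ↔ G k ≠ [] := by
      rw [hcont k, ← hval k hkmem, Ne, List.map_eq_nil_iff, List.mem_map]
      constructor
      · rintro ⟨pc, hpc, hfst⟩ hnil
        rw [List.filter_eq_nil_iff] at hnil
        exact hnil pc hpc (by simpa using hfst)
      · intro hne
        rcases hne2 : pairs.filter (fun pc => pc.1 == k) with _ | ⟨pc, rest⟩
        · exact absurd hne2 hne
        · have hpc : pc ∈ pairs.filter (fun pc => pc.1 == k) := by rw [hne2]; exact List.mem_cons_self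
          rw [List.mem_filter] at hpc
          exact ⟨pc, hpc.1, by simpa using hpc.2⟩
    by_cases hc : children.contains k = true
    · rw [if_pos hc, if_pos (hiff.mp hc), hget k, hval k hkmem]
    · rw [if_neg (by simpa using hc), if_neg (fun hne => hc (hiff.mpr hne))]
  rw [List.filterMap_congr (fun k hk => hfun k hk), pv_filterMap_filter G]

lemma pv_main (g : List (String × List String)) (hnd : (g.map Prod.fst).Nodup) :
    find_dep_graph g = find_dep_graph_alt g := by
  rw [pvB_eq g hnd]
  simp only [find_dep_graph]
  have hkeys : (PySem.Dict.mk g).keys = g.map Prod.fst := rfl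
  set keys := (PySem.Dict.mk g).keys with hk
  have hndk : keys.Nodup := by rw [hkeys]; exact hnd
  -- A's side: a filtered map over the keys
  rw [pv_init_dict keys hndk (fun i => find_parents i g),
    pv_init_dict keys hndk (fun _ => ([] : List String)),
    pvA_outer keys (keys.map (fun k => (k, find_parents k g))) keys
      (fun _ => ([] : List String)) hndk (fun _ hx => hx)]
  show ((keys.map _) : List (String × List String)).filter _ = _
  congr 1
  apply List.map_congr_left
  intro k hkmem
  rw [if_pos hkmem]
  simp only [List.nil_append, List.flatMap_map]
  congr 1
  rw [hkeys, List.flatMap_map]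
  simp only [List.flatMap_def]
  apply congrArg List.flatten
  apply List.map_congr_left
  intro cp hcp
  have : find_parents cp.1 g = ancestorsRec g [] cp.2 := by
    rw [pv_find_parents_eq, pv_get_of_mem g hnd cp hcp]
  simp [this]

-- ===== VERDICT (by name: the statement is the Claim_ definition above) =====
theorem find_dep_graph_spec : Claim_equal_find_dep_graph := by
  intro dependency_graph _ hpre
  unfold Spec_find_dep_graph
  exact pv_main dependency_graph hpre
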